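-- pv_equiv track=rewrite | github.com/Resume-Projects/Website-builder | site_generator.py | url_linker
-- ===== SOURCE A (Python) =====
-- def url_linker(names, titles):
--     """
--     if needed, gets all of the urls
--     :param names: list of the file names
--     :param titles: list of the actual titles
--     :return: the framework for the urls
--     """
--     numb = 0
--     name_list = []
--     url = ''
--     url += '<p align="center">'
--     for _ in names:
--         name_list.append('new_file' + str(numb) + '.html')
--         numb += 1
--     numb = 0
--     for i in names:
--         url += '<a href="' + name_list[numb] + '">' + titles[numb] + '</a>---'
--         numb += 1
--     url += '\n</p>\n'
--     return url
-- ===== SOURCE B (Python) =====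
-- def url_linker(names, titles):
--     """
--     if needed, gets all of the urls
--     :param names: list of the file names
--     :param titles: list of the actual titles
--     :return: the framework for the urls
--     """
--     parts = ['\n</p>\n']
--     i = len(names)
--     while i > 0:
--         i -= 1
--         parts.append('<a href="new_file' + str(i) + '.html">' + titles[i] + '</a>---')
--     parts.append('<p align="center">')
--     parts.reverse()
--     return ''.join(parts)
-- ===== Notes on version B (the rewrite author's own statement) =====
-- stated objective: alternative
-- what changed: B builds the page back-to-front: counting the index down from len(names) it collects the closing tag, then each anchor in reverse, then the opening tag into a list, reverses it and joins once, with no precomputed name_list and no second forward pass.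
import Mathlib
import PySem

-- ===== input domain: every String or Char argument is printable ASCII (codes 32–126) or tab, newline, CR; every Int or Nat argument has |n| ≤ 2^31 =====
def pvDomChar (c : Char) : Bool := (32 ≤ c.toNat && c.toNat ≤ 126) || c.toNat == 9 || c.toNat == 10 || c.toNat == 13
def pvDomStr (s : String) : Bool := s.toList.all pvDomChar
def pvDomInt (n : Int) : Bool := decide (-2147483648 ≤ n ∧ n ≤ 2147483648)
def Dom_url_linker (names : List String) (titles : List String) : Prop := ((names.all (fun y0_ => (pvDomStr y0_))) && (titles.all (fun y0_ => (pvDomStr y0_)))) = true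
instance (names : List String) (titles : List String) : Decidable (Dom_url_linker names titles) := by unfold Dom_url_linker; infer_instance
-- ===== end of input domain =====

-- B builds the output back-to-front: starting from the closing tag it prepends each anchor
-- while counting the index down, with no name_list table and no second pass (objective: alternative).

-- ===== PORT A =====
def url_linker (names : List String) (titles : List String) : String :=
  -- first loop: name_list.append('new_file' + str(numb) + '.html'), numb += 1
  let name_list := (names.foldl
      (fun (st : Int × List String) _ =>
        (st.1 + 1, st.2 ++ ["new_file" ++ PySem.Int.toStr st.1 ++ ".html"]))
      (0, [])).2
  -- second loop: url += '<a href="' + name_list[numb] + '">' + titles[numb] + '</a>---', numb += 1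
  -- (indexing is total in range under Pre_, so pyGetD with a dummy default is exact there)
  let url := (names.foldl
      (fun (st : Int × String) _ =>
        (st.1 + 1, st.2 ++ "<a href=\"" ++ PySem.List.pyGetD name_list st.1 ""
          ++ "\">" ++ PySem.List.pyGetD titles st.1 "" ++ "</a>---"))
      (0, "<p align=\"center\">")).2
  url ++ "\n</p>\n"

-- ===== PORT B =====
-- B's while loop 'i -= 1; parts.append(anchor(i))' counting i down from len(names) to 0
def urlAltLoop (titles : List String) : Nat → List String → List String
  | 0, parts => parts
  | i + 1, parts => urlAltLoop titles i
      (parts ++ ["<a href=\"new_file" ++ PySem.Int.toStr (i : Int) ++ ".html\">"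
        ++ PySem.List.pyGetD titles (i : Int) "" ++ "</a>---"])

def url_linker_alt (names : List String) (titles : List String) : String :=
  PySem.Str.join ""
    ((urlAltLoop titles names.length ["\n</p>\n"] ++ ["<p align=\"center\">"]).reverse)

-- ===== PRECONDITION & SPEC =====
-- Python A indexes titles[numb] for numb = 0 .. len(names)-1 and raises IndexError when
-- titles is shorter than names; exactly those inputs are excluded (B raises there too).
def Pre_url_linker (names : List String) (titles : List String) : Prop :=
  names.length ≤ titles.length
instance (names : List String) (titles : List String) : Decidable (Pre_url_linker names titles) := by unfold Pre_url_linker; infer_instance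
def pvWitness_url_linker : List String × List String := (["about", "blog"], ["About me", "My blog"])

def Spec_url_linker (names : List String) (titles : List String) (out : String) : Prop := out = url_linker_alt names titles
instance (names : List String) (titles : List String) (out : String) : Decidable (Spec_url_linker names titles out) := by unfold Spec_url_linker; infer_instance

-- ===== CLAIM (what is proved, stated in full; the proofs are below) =====
def Claim_equal_url_linker : Prop := ∀ (names : List String) (titles : List String), Dom_url_linker names titles → Pre_url_linker names titles → Spec_url_linker names titles (url_linker names titles)

-- ===== LEMMAS AND PROOFS =====
lemma join_empty_cons (a : String) (l : List String) :
    PySem.Str.join "" (a :: l) = a ++ PySem.Str.join "" l := by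
  apply String.toList_inj.mp
  cases l <;> simp [PySem.Str.join, PySem.Chars.join, List.intercalate]

lemma join_empty_nil : PySem.Str.join "" ([] : List String) = "" := by
  apply String.toList_inj.mp
  simp [PySem.Str.join, PySem.Chars.join, List.intercalate]

lemma join_empty_append (l1 l2 : List String) :
    PySem.Str.join "" (l1 ++ l2) = PySem.Str.join "" l1 ++ PySem.Str.join "" l2 := by
  induction l1 with
  | nil => simp [join_empty_nil]
  | cons a tl ih => simp [join_empty_cons, ih, String.append_assoc]

-- A's first loop: append-with-counter is the map of the counter range
lemma loop1 {α : Type} (g : Int → String) (ns : List α) :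
    ∀ (k : Int) (acc : List String),
    ns.foldl (fun (st : Int × List String) _ => (st.1 + 1, st.2 ++ [g st.1])) (k, acc)
    = (k + ns.length, acc ++ (PySem.List.pyRange k (k + ns.length) 1).map g) := by
  induction ns with
  | nil => intro k acc; simp [PySem.List.pyRange_one_eq_nil]
  | cons a tl ih =>
    intro k acc
    simp only [List.foldl_cons, ih (k + 1) (acc ++ [g k]), List.length_cons]
    refine Prod.ext (by push_cast; ring) ?_
    push_cast
    rw [show k + ((tl.length : Int) + 1) = k + 1 + tl.length from by ring]
    rw [PySem.List.pyRange_one_cons (show k < k + 1 + (tl.length : Int) from by omega)]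
    simp

-- A's second loop: string accumulation with a counter is the join of the mapped counter range
lemma loop2 {α : Type} (g : Int → String) (ns : List α) :
    ∀ (k : Int) (acc : String),
    ns.foldl (fun (st : Int × String) _ => (st.1 + 1, st.2 ++ g st.1)) (k, acc)
    = (k + ns.length, acc ++ PySem.Str.join "" ((PySem.List.pyRange k (k + ns.length) 1).map g)) := by
  induction ns with
  | nil => intro k acc; simp [PySem.List.pyRange_one_eq_nil, join_empty_nil]
  | cons a tl ih =>
    intro k acc
    simp only [List.foldl_cons, ih (k + 1) (acc ++ g k), List.length_cons]
    refine Prod.ext (by push_cast; ring) ?_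
    push_cast
    rw [show k + ((tl.length : Int) + 1) = k + 1 + tl.length from by ring]
    rw [PySem.List.pyRange_one_cons (show k < k + 1 + (tl.length : Int) from by omega)]
    simp [join_empty_cons, String.append_assoc]

-- B's countdown loop collects the mapped range in reverse after the seed
lemma altLoop_eq (titles : List String) :
    ∀ (n : Nat) (parts : List String),
    urlAltLoop titles n parts
    = parts ++ ((PySem.List.pyRange 0 n 1).map (fun i =>
        "<a href=\"new_file" ++ PySem.Int.toStr i ++ ".html\">"
          ++ PySem.List.pyGetD titles i "" ++ "</a>---")).reverse := by
  intro n
  induction n with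
  | zero => intro parts; simp [urlAltLoop, PySem.List.pyRange_one_eq_nil]
  | succ m ih =>
    intro parts
    rw [urlAltLoop, ih]
    rw [show ((m + 1 : Nat) : Int) = (m : Int) + 1 from by push_cast; ring]
    rw [PySem.List.pyRange_one_succ_right (by positivity)]
    simp

-- per-index anchor: A's chunks regrouped are B's chunks
lemma part_eq (x y : String) :
    "<a href=\"" ++ ("new_file" ++ (x ++ (".html" ++ ("\">" ++ (y ++ "</a>---"))))) =
    "<a href=\"new_file" ++ (x ++ (".html\">" ++ (y ++ "</a>---"))) := by
  apply String.toList_inj.mp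
  simp

-- ===== VERDICT (by name: the statement is the Claim_ definition above) =====
theorem url_linker_spec : Claim_equal_url_linker := by
  unfold Claim_equal_url_linker
  intro names titles _ _
  unfold Spec_url_linker url_linker url_linker_alt
  simp only [String.append_assoc]
  rw [loop1 (fun i => "new_file" ++ (PySem.Int.toStr i ++ ".html")) names 0 []]
  simp only [zero_add, List.nil_append]
  rw [loop2 (fun i => "<a href=\"" ++ (PySem.List.pyGetD ((PySem.List.pyRange 0 names.length 1).map fun i => "new_file" ++ (PySem.Int.toStr i ++ ".html")) i "" ++ ("\">" ++ (PySem.List.pyGetD titles i "" ++ "</a>---")))) names 0 "<p align=\"center\">"]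
  simp only [zero_add, String.append_assoc]
  rw [altLoop_eq]
  simp only [List.reverse_append, List.reverse_reverse, List.reverse_cons, List.reverse_nil,
    List.nil_append, List.cons_append]
  rw [join_empty_cons, join_empty_append, join_empty_cons, join_empty_nil]
  simp only [String.append_assoc, String.append_empty]
  congr 3
  apply List.map_congr_left
  intro i hi
  have hmem := (PySem.List.mem_pyRange_one).mp hi
  rw [PySem.List.pyGetD_map_pyRange_of_nonneg _ _ _ _ hmem.1 hmem.2]
  simp only [String.append_assoc]
  exact part_eq (PySem.Int.toStr i) (PySem.List.pyGetD titles i "")
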